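-- pv_equiv track=rewrite | github.com/qkdk/CodingTest | Programmers_LV_3/최고의 집합.py | solution
-- ===== SOURCE A (Python) =====
-- def solution(n, s):
--     answer = []
--
--     flag = s // n
--     remain = s - flag * n
--
--     if flag < 1:
--         return [-1]
--
--     for _ in range(n):
--         if remain > 0:
--             answer.append(flag + 1)
--             remain -= 1
--         else:
--             answer.append(flag)
--
--     answer.sort(reverse=False)
--
--     return answer
-- ===== SOURCE B (Python) =====
-- def solution(n, s):
--     if s // n < 1:
--         return [-1]
--     out = []
--     while n > 0:
--         x = -(-s // n)          # largest remaining element: ceil(s / n)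
--         out.append(x)
--         s -= x
--         n -= 1
--     out.reverse()
--     return out
-- ===== Notes on version B (the rewrite author's own statement) =====
-- stated objective: alternative
-- what changed: Replaces A's divmod split (flag/remain with a countdown loop plus a final sort) by a greedy peeling recursion: repeatedly take the ceiling of s/n as the largest element, subtract it, decrement n, and reverse the descending list at the end; no remainder bookkeeping and no sort.
import Mathlib
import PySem

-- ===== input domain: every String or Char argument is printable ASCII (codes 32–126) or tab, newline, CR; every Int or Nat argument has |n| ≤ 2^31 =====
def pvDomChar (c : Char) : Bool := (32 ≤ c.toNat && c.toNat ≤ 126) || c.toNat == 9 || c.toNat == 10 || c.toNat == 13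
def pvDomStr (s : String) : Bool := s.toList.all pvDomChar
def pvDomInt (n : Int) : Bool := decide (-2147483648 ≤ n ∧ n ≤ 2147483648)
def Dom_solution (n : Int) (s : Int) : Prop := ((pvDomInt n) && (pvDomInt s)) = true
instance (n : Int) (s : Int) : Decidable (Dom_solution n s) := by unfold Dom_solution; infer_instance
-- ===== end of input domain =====

-- B replaces A's divmod/remainder loop + sort by greedy peeling: repeatedly take
-- ceil(s/n) as the largest element, then reverse; objective: alternative decomposition.


-- ===== PORT A =====
def solution (n : Int) (s : Int) : List Int :=
  let flag := PySem.Int.floordiv s n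
  let remain := s - flag * n
  if flag < 1 then [-1]
  else
    let st := (PySem.List.pyRange 0 n 1).foldl
      (fun (st : List Int × Int) _ =>
        if st.2 > 0 then (st.1 ++ [flag + 1], st.2 - 1) else (st.1 ++ [flag], st.2))
      ([], remain)
    PySem.List.sorted st.1 (fun x => x) false

-- ===== PORT B =====
-- B's while loop: state (n, s, out); fuel n.toNat counts the iterations (n > 0 exactly n.toNat times).
def solGo (fuel : Nat) (n : Int) (s : Int) (out : List Int) : List Int :=
  match fuel with
  | 0 => out
  | fuel + 1 =>
    let x := -(PySem.Int.floordiv (-s) n)   -- ceil(s / n) as -(-s // n)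
    solGo fuel (n - 1) (s - x) (out ++ [x])

def solution_alt (n : Int) (s : Int) : List Int :=
  if PySem.Int.floordiv s n < 1 then [-1]
  else (solGo n.toNat n s []).reverse

-- ===== PRECONDITION & SPEC =====
-- Pre_ excludes exactly n = 0, where Python A raises ZeroDivisionError.
def Pre_solution (n : Int) (_s : Int) : Prop := n ≠ 0
instance (n : Int) (s : Int) : Decidable (Pre_solution n s) := by unfold Pre_solution; infer_instance
def pvWitness_solution : Int × Int := (3, 7)

def Spec_solution (n : Int) (s : Int) (out : List Int) : Prop := out = solution_alt n s
instance (n : Int) (s : Int) (out : List Int) : Decidable (Spec_solution n s out) := by unfold Spec_solution; infer_instance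

-- ===== CLAIM (what is proved, stated in full; the proofs are below) =====
def Claim_equal_solution : Prop := ∀ (n : Int) (s : Int), Dom_solution n s → Pre_solution n s → Spec_solution n s (solution n s)

-- ===== LEMMAS AND PROOFS =====

-- A's loop, run over any list of length m with nonnegative remain r, appends
-- min r m copies of (flag+1) followed by the remaining copies of flag.
theorem loopA_spec (flag : Int) (l : List Int) :
    ∀ (acc : List Int) (r : Int), 0 ≤ r →
    (l.foldl
      (fun (st : List Int × Int) _ =>
        if st.2 > 0 then (st.1 ++ [flag + 1], st.2 - 1) else (st.1 ++ [flag], st.2))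
      (acc, r)).1
    = acc ++ List.replicate (min r.toNat l.length) (flag + 1)
          ++ List.replicate (l.length - min r.toNat l.length) flag := by
  induction l with
  | nil => intro acc r _; simp
  | cons x xs ih =>
    intro acc r hr
    by_cases h : r > 0
    · have hrec := ih (acc ++ [flag + 1]) (r - 1) (by omega)
      simp only [List.foldl_cons, if_pos h]
      rw [hrec]
      have h1 : min r.toNat (x :: xs).length = min (r - 1).toNat xs.length + 1 := by
        simp [List.length_cons]; omega
      rw [h1]
      have h2 : (x :: xs).length - (min (r - 1).toNat xs.length + 1)
              = xs.length - min (r - 1).toNat xs.length := by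
        simp [List.length_cons]
      rw [h2, List.replicate_succ]
      simp
    · have hr0 : r = 0 := by omega
      subst hr0
      have hrec := ih (acc ++ [flag]) 0 le_rfl
      simp only [List.foldl_cons, if_neg h]
      rw [hrec]
      simp only [Int.toNat_zero, Nat.zero_min, List.replicate_zero,
        List.append_nil, Nat.sub_zero, List.append_assoc, List.singleton_append]
      simp [List.replicate_succ]

theorem pairwise_target (q : Int) (a b : Nat) :
    (List.replicate a q ++ List.replicate b (q + 1)).Pairwise (· ≤ ·) := by
  rw [List.pairwise_append]
  refine ⟨List.pairwise_replicate.mpr (by simp), List.pairwise_replicate.mpr (by simp), ?_⟩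
  intro x hx y hy
  rw [List.eq_of_mem_replicate hx, List.eq_of_mem_replicate hy]
  omega

-- B's peeling loop, started at n = k with s = q*k + r (0 ≤ r ≤ k), emits r copies
-- of q+1 (while the remainder lasts) followed by k - r copies of q, in that order.
theorem loopB_spec :
    ∀ (k : Nat) (q r : Int) (acc : List Int), 0 ≤ r → r ≤ (k : Int) →
    solGo k (k : Int) (q * k + r) acc
    = acc ++ List.replicate r.toNat (q + 1) ++ List.replicate (k - r.toNat) q := by
  intro k
  induction k with
  | zero => intro q r acc h0 h1; have : r = 0 := by omega
            simp [solGo, this]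
  | succ k ih =>
    intro q r acc h0 h1
    push_cast at h1
    by_cases hr : 0 < r
    · have hx : -(PySem.Int.floordiv (-(q * ((k : Int) + 1) + r)) ((k : Int) + 1)) = q + 1 := by
        rw [PySem.Int.neg_floordiv_neg_eq_iff_of_pos]
        · constructor <;> nlinarith
        · omega
      have harg : q * ((k : Int) + 1) + r - (q + 1) = q * (k : Int) + (r - 1) := by ring
      simp only [solGo, Nat.cast_add, Nat.cast_one]
      have hsub : ((k : Int) + 1 - 1) = (k : Int) := by ring
      rw [hx, harg, hsub, ih q (r - 1) (acc ++ [q + 1]) (by omega) (by omega)]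
      have h1' : r.toNat = (r - 1).toNat + 1 := by omega
      have h2' : k - (r - 1).toNat = (k + 1) - r.toNat := by omega
      rw [h1', h2', List.replicate_succ]
      simp
      omega
    · have hr0 : r = 0 := by omega
      subst hr0
      have hx : -(PySem.Int.floordiv (-(q * ((k : Int) + 1) + 0)) ((k : Int) + 1)) = q := by
        rw [PySem.Int.neg_floordiv_neg_eq_iff_of_pos]
        · constructor <;> nlinarith
        · omega
      have harg : q * ((k : Int) + 1) + 0 - q = q * (k : Int) + 0 := by ring
      simp only [solGo, Nat.cast_add, Nat.cast_one]
      have hsub : ((k : Int) + 1 - 1) = (k : Int) := by ring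
      rw [hx, harg, hsub, ih q 0 (acc ++ [q]) le_rfl (by omega)]
      simp [List.replicate_succ]

-- ===== VERDICT (by name: the statement is the Claim_ definition above) =====
theorem solution_spec : Claim_equal_solution := by
  intro n s _ hn
  unfold Spec_solution solution solution_alt
  simp only
  set q := PySem.Int.floordiv s n with hq
  have hmod : s - q * n = PySem.Int.mod s n := by
    have h := PySem.Int.floordiv_mul_add_mod s n
    rw [← hq] at h
    omega
  rw [hmod]
  set r := PySem.Int.mod s n with hrdef
  by_cases hflag : q < 1
  · simp [hflag]
  · simp only [if_neg hflag]
    rcases lt_or_gt_of_ne hn with hneg | hpos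
    · -- n < 0 : both loops run zero times
      have hb := PySem.Int.mod_neg_bounds s hneg
      rw [PySem.List.pyRange_one_eq_nil (by omega)]
      have hk : n.toNat = 0 := by omega
      simp [hk, solGo, PySem.List.sorted]
    · -- n > 0 : 0 ≤ r < n
      have hr0 : 0 ≤ r := PySem.Int.mod_nonneg s hpos
      have hrn : r < n := PySem.Int.mod_lt s hpos
      have hlen : (PySem.List.pyRange 0 n 1).length = n.toNat := by
        rw [PySem.List.length_pyRange_one]; omega
      have hloop := loopA_spec q (PySem.List.pyRange 0 n 1) [] r hr0
      rw [hloop, hlen]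
      have hmin : min r.toNat n.toNat = r.toNat := by omega
      rw [hmin]
      have hn' : ((n.toNat : Nat) : Int) = n := by omega
      have hs : s = q * n + r := by
        have h := PySem.Int.floordiv_mul_add_mod s n
        rw [← hq, ← hrdef] at h; omega
      have hB := loopB_spec n.toNat q r [] hr0 (by omega)
      rw [hn', ← hs] at hB
      rw [hB]
      simp only [List.nil_append, List.reverse_append, List.reverse_replicate]
      apply PySem.List.sorted_id_eq_of_perm_of_pairwise
      · exact List.perm_append_comm.trans (by simp)
      · exact pairwise_target q (n.toNat - r.toNat) r.toNat
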